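-- pv_equiv track=rewrite | github.com/victor-shammas/media-monitor | ai_reporter.py | style_html
-- ===== SOURCE A (Python) =====
-- def style_html(raw_html: str) -> str:
--     """Inject inline styles into the converted Markdown HTML for email clients."""
--     replacements = [
--         (
--             "<h1>",
--             '<h1 style="font-size:20px; color:#1a1a2e; margin:28px 0 12px 0; '
--             'border-bottom:2px solid #1a1a2e; padding-bottom:6px;">',
--         ),
--         ("<h2>", '<h2 style="font-size:17px; color:#1a1a2e; margin:24px 0 10px 0;">'),
--         (
--             "<h3>",
--             '<h3 style="font-size:15px; color:#333; margin:20px 0 8px 0; '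
--             'font-family:Helvetica,Arial,sans-serif;">',
--         ),
--         ("<p>", '<p style="margin:0 0 14px 0;">'),
--         ("<ul>", '<ul style="margin:0 0 16px 0; padding-left:20px;">'),
--         ("<ol>", '<ol style="margin:0 0 16px 0; padding-left:20px;">'),
--         ("<li>", '<li style="margin:0 0 6px 0;">'),
--         ("<strong>", '<strong style="color:#1a1a2e;">'),
--         (
--             "<blockquote>",
--             '<blockquote style="margin:16px 0; padding:12px 20px; '
--             "border-left:3px solid #1a1a2e; background:#f8f8fa; "
--             'font-style:italic; color:#555;">',
--         ),
--         ("<hr>", '<hr style="border:none; border-top:1px solid #ddd; margin:24px 0;">'),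
--         (
--             "<hr/>",
--             '<hr style="border:none; border-top:1px solid #ddd; margin:24px 0;">',
--         ),
--         (
--             "<hr />",
--             '<hr style="border:none; border-top:1px solid #ddd; margin:24px 0;">',
--         ),
--     ]
--     for old, new in replacements:
--         raw_html = raw_html.replace(old, new)
--     return raw_html
-- ===== SOURCE B (Python) =====
-- def style_html(raw_html: str) -> str:
--     """Inject inline styles into the converted Markdown HTML for email clients."""
--     styles = {
--         "<h1>": '<h1 style="font-size:20px; color:#1a1a2e; margin:28px 0 12px 0; '
--                 'border-bottom:2px solid #1a1a2e; padding-bottom:6px;">',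
--         "<h2>": '<h2 style="font-size:17px; color:#1a1a2e; margin:24px 0 10px 0;">',
--         "<h3>": '<h3 style="font-size:15px; color:#333; margin:20px 0 8px 0; '
--                 'font-family:Helvetica,Arial,sans-serif;">',
--         "<p>": '<p style="margin:0 0 14px 0;">',
--         "<ul>": '<ul style="margin:0 0 16px 0; padding-left:20px;">',
--         "<ol>": '<ol style="margin:0 0 16px 0; padding-left:20px;">',
--         "<li>": '<li style="margin:0 0 6px 0;">',
--         "<strong>": '<strong style="color:#1a1a2e;">',
--         "<blockquote>": '<blockquote style="margin:16px 0; padding:12px 20px; '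
--                         "border-left:3px solid #1a1a2e; background:#f8f8fa; "
--                         'font-style:italic; color:#555;">',
--         "<hr>": '<hr style="border:none; border-top:1px solid #ddd; margin:24px 0;">',
--         "<hr/>": '<hr style="border:none; border-top:1px solid #ddd; margin:24px 0;">',
--         "<hr />": '<hr style="border:none; border-top:1px solid #ddd; margin:24px 0;">',
--     }
--     out = []
--     i = 0
--     n = len(raw_html)
--     while i < n:
--         ch = raw_html[i]
--         if ch == "<":
--             for old, new in styles.items():
--                 if raw_html.startswith(old, i):
--                     out.append(new)
--                     i += len(old)
--                     break
--             else:
--                 out.append(ch)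
--                 i += 1
--         else:
--             out.append(ch)
--             i += 1
--     return "".join(out)
-- ===== Notes on version B (the rewrite author's own statement) =====
-- stated objective: alternative
-- what changed: Replaces A's 13 sequential full-string .replace passes by a single left-to-right scan that dispatches each matched tag through one lookup table, emitting the replacement and skipping past it.
import Mathlib
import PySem

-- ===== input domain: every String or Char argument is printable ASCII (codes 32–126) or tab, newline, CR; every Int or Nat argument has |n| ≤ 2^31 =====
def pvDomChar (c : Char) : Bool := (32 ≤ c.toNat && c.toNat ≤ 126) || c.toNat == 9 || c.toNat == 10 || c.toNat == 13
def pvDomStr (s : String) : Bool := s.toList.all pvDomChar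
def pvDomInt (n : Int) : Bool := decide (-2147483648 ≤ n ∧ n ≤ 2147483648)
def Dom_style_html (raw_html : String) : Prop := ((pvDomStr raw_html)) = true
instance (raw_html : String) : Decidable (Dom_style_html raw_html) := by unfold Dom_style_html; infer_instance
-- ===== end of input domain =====

-- B replaces A's 13 sequential full-string `.replace` passes by ONE left-to-right scan that
-- dispatches each matched tag through a lookup table (objective: alternative single-pass algorithm).

-- ===== PORT A =====
def pvReplacements : List (String × String) :=
  [ ("<h1>", "<h1 style=\"font-size:20px; color:#1a1a2e; margin:28px 0 12px 0; border-bottom:2px solid #1a1a2e; padding-bottom:6px;\">"),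
    ("<h2>", "<h2 style=\"font-size:17px; color:#1a1a2e; margin:24px 0 10px 0;\">"),
    ("<h3>", "<h3 style=\"font-size:15px; color:#333; margin:20px 0 8px 0; font-family:Helvetica,Arial,sans-serif;\">"),
    ("<p>", "<p style=\"margin:0 0 14px 0;\">"),
    ("<ul>", "<ul style=\"margin:0 0 16px 0; padding-left:20px;\">"),
    ("<ol>", "<ol style=\"margin:0 0 16px 0; padding-left:20px;\">"),
    ("<li>", "<li style=\"margin:0 0 6px 0;\">"),
    ("<strong>", "<strong style=\"color:#1a1a2e;\">"),
    ("<blockquote>", "<blockquote style=\"margin:16px 0; padding:12px 20px; border-left:3px solid #1a1a2e; background:#f8f8fa; font-style:italic; color:#555;\">"),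
    ("<hr>", "<hr style=\"border:none; border-top:1px solid #ddd; margin:24px 0;\">"),
    ("<hr/>", "<hr style=\"border:none; border-top:1px solid #ddd; margin:24px 0;\">"),
    ("<hr />", "<hr style=\"border:none; border-top:1px solid #ddd; margin:24px 0;\">") ]

def style_html (raw_html : String) : String :=
  pvReplacements.foldl (fun r p => PySem.Str.replace r p.1 p.2) raw_html

-- ===== PORT B =====
-- the dict of Source B, in insertion order, as (key, value) pairs over the code points
def pvStyles : List (List Char × List Char) :=
  [ ("<h1>".toList, "<h1 style=\"font-size:20px; color:#1a1a2e; margin:28px 0 12px 0; border-bottom:2px solid #1a1a2e; padding-bottom:6px;\">".toList),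
    ("<h2>".toList, "<h2 style=\"font-size:17px; color:#1a1a2e; margin:24px 0 10px 0;\">".toList),
    ("<h3>".toList, "<h3 style=\"font-size:15px; color:#333; margin:20px 0 8px 0; font-family:Helvetica,Arial,sans-serif;\">".toList),
    ("<p>".toList, "<p style=\"margin:0 0 14px 0;\">".toList),
    ("<ul>".toList, "<ul style=\"margin:0 0 16px 0; padding-left:20px;\">".toList),
    ("<ol>".toList, "<ol style=\"margin:0 0 16px 0; padding-left:20px;\">".toList),
    ("<li>".toList, "<li style=\"margin:0 0 6px 0;\">".toList),
    ("<strong>".toList, "<strong style=\"color:#1a1a2e;\">".toList),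
    ("<blockquote>".toList, "<blockquote style=\"margin:16px 0; padding:12px 20px; border-left:3px solid #1a1a2e; background:#f8f8fa; font-style:italic; color:#555;\">".toList),
    ("<hr>".toList, "<hr style=\"border:none; border-top:1px solid #ddd; margin:24px 0;\">".toList),
    ("<hr/>".toList, "<hr style=\"border:none; border-top:1px solid #ddd; margin:24px 0;\">".toList),
    ("<hr />".toList, "<hr style=\"border:none; border-top:1px solid #ddd; margin:24px 0;\">".toList) ]

theorem pvStyles_keys_ne_nil : ∀ p ∈ pvStyles, p.1 ≠ [] := by decide

-- the single left-to-right scan of Source B (the while loop with the for/else first-match dispatch)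
def pvScanB : List Char → List Char
  | [] => []
  | c :: t =>
    if c = '<' then
      match hf : pvStyles.find? (fun p => p.1.isPrefixOf (c :: t)) with
      | some p => p.2 ++ pvScanB ((c :: t).drop p.1.length)
      | none => c :: pvScanB t
    else c :: pvScanB t
  termination_by l => l.length
  decreasing_by
  · have h1 : 0 < p.1.length :=
      List.length_pos_iff.mpr (pvStyles_keys_ne_nil p (List.mem_of_find?_eq_some hf))
    simp [List.length_drop]; omega
  · simp
  · simp

def style_html_alt (raw_html : String) : String :=
  String.ofList (pvScanB raw_html.toList)

-- ===== PRECONDITION & SPEC =====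
def Spec_style_html (raw_html : String) (out : String) : Prop := out = style_html_alt raw_html
instance (raw_html : String) (out : String) : Decidable (Spec_style_html raw_html out) := by unfold Spec_style_html; infer_instance

-- ===== CLAIM (what is proved, stated in full; the proofs are below) =====
def Claim_equal_style_html : Prop := ∀ (raw_html : String), Dom_style_html raw_html → Spec_style_html raw_html (style_html raw_html)

-- ===== LEMMAS AND PROOFS =====

-- generic first-match table scan (proof-side reference semantics for both programs)
def pvScanG (T : List (List Char × List Char)) : List Char → List Char
  | [] => []
  | c :: t =>
    match _h : T.find? (fun p => p.1.isPrefixOf (c :: t)) with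
    | some p => p.2 ++ pvScanG T ((c :: t).drop (max 1 p.1.length))
    | none => c :: pvScanG T t
  termination_by l => l.length
  decreasing_by
  all_goals simp [List.length_drop]

theorem pvScanG_nil (T : List (List Char × List Char)) : pvScanG T [] = [] := by
  rw [pvScanG]

theorem pvScanG_cons_some (T : List (List Char × List Char)) (c : Char) (t : List Char)
    (p : List Char × List Char)
    (h : T.find? (fun p => p.1.isPrefixOf (c :: t)) = some p) (hne : p.1 ≠ []) :
    pvScanG T (c :: t) = p.2 ++ pvScanG T ((c :: t).drop p.1.length) := by
  have hmax : max 1 p.1.length = p.1.length := by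
    have := List.length_pos_iff.mpr hne; omega
  rw [pvScanG]
  split
  · rename_i p' h'
    rw [h] at h'
    cases h'
    rw [hmax]
  · rename_i h'
    rw [h] at h'
    cases h'

theorem pvScanG_cons_none (T : List (List Char × List Char)) (c : Char) (t : List Char)
    (h : T.find? (fun p => p.1.isPrefixOf (c :: t)) = none) :
    pvScanG T (c :: t) = c :: pvScanG T t := by
  rw [pvScanG]
  split
  · rename_i p' h'
    rw [h] at h'
    cases h'
  · rfl

-- a nonempty key starting with '<' is no prefix of a list that does not start with '<'
theorem pvNotPrefix_of_head (k l : List Char) (hk : k.head? = some '<')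
    (hl : l.head? ≠ some '<') : ¬ k <+: l := by
  intro hp
  cases k with
  | nil => simp at hk
  | cons a k' =>
    cases l with
    | nil => simp [List.prefix_nil] at hp
    | cons b l' =>
      simp at hk
      rcases (List.cons_prefix_cons.mp hp) with ⟨hab, -⟩
      exact hl (by simp [← hab, hk])

-- a key that is at most as long as `a` and no prefix of `a` is no prefix of `a ++ X`
theorem pvNotPrefix_append (k a X : List Char) (hlen : k.length ≤ a.length)
    (hnp : ¬ k <+: a) : ¬ k <+: a ++ X := by
  intro hp
  apply hnp
  have htake : (a ++ X).take k.length = a.take k.length := List.take_append_of_le_length hlen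
  have := List.prefix_take_iff.mpr ⟨hp, le_refl _⟩
  rw [htake] at this
  exact this.trans (List.take_prefix _ _)

-- the scan walks chunk `a` char by char when `a` contains no '<' and every key starts with '<'
theorem pvScanG_skip (T : List (List Char × List Char))
    (hT : ∀ p ∈ T, p.1.head? = some '<') (a X : List Char) (ha : '<' ∉ a) :
    pvScanG T (a ++ X) = a ++ pvScanG T X := by
  induction a with
  | nil => rfl
  | cons c a' ih =>
    have hfind : T.find? (fun p => p.1.isPrefixOf (c :: (a' ++ X))) = none := by
      apply List.find?_eq_none.mpr
      intro p hp
      simp only [List.isPrefixOf_iff_prefix]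
      apply pvNotPrefix_of_head _ _ (hT p hp)
      have hc : c ≠ '<' := fun hc => ha (by simp [hc])
      simp [hc]
    rw [List.cons_append, pvScanG_cons_none _ _ _ hfind, ih (by simp_all)]
    simp

theorem pvNeNil (w : List Char) (h : w.head? = some '<') : w ≠ [] := by
  intro hw; rw [hw] at h; simp at h

theorem pvScanG_nil_table (l : List Char) : pvScanG [] l = l := by
  induction l with
  | nil => exact pvScanG_nil []
  | cons c t ih => rw [pvScanG_cons_none [] c t (by simp), ih]

-- a '<'-free prefix of a scan result is a prefix of the original string
theorem pvPrefix_of_prefix_scanG (T : List (List Char × List Char))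
    (hkeys : ∀ p ∈ T, p.1 ≠ []) (hvals : ∀ p ∈ T, p.2.head? = some '<') :
    ∀ (t m : List Char), '<' ∉ m → m <+: pvScanG T t → m <+: t := by
  intro t
  induction t with
  | nil =>
    intro m _ h
    rw [pvScanG_nil] at h
    rw [List.prefix_nil.mp h]
  | cons c t' ih =>
    intro m hm h
    cases m with
    | nil => exact List.nil_prefix
    | cons d m' =>
      cases hfind : T.find? (fun p => p.1.isPrefixOf (c :: t')) with
      | some p =>
        have hpm := List.mem_of_find?_eq_some hfind
        rw [pvScanG_cons_some T c t' p hfind (hkeys p hpm)] at h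
        obtain ⟨v', hv'⟩ : ∃ v', p.2 = '<' :: v' := by
          cases hv : p.2 with
          | nil => have := hvals p hpm; rw [hv] at this; simp at this
          | cons x y =>
            have := hvals p hpm; rw [hv] at this; simp at this
            exact ⟨y, by rw [this]⟩
        rw [hv', List.cons_append] at h
        rcases List.cons_prefix_cons.mp h with ⟨hd, -⟩
        exact absurd (by rw [hd]; exact List.mem_cons_self) hm
      | none =>
        rw [pvScanG_cons_none T c t' hfind] at h
        rcases List.cons_prefix_cons.mp h with ⟨hd, hm'⟩
        exact List.cons_prefix_cons.mpr
          ⟨hd, ih m' (fun hx => hm (List.mem_cons_of_mem _ hx)) hm'⟩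

-- find? on a one-entry table
theorem pvFind1_some (k v l : List Char) (h : k <+: l) :
    [(k, v)].find? (fun p => p.1.isPrefixOf l) = some (k, v) := by
  have hb : k.isPrefixOf l = true := List.isPrefixOf_iff_prefix.mpr h
  simp [List.find?, hb]

theorem pvFind1_none (k v l : List Char) (h : ¬ k <+: l) :
    [(k, v)].find? (fun p => p.1.isPrefixOf l) = none := by
  have hb : k.isPrefixOf l = false := by
    rw [← Bool.not_eq_true, List.isPrefixOf_iff_prefix]; exact h
  simp [List.find?, hb]

-- the singleton scan walks over a value chunk `a` that the key `k` cannot match into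
theorem pvScanG_skip_val (k v a X : List Char) (hk : k.head? = some '<')
    (ha : a.head? = some '<') (hat : '<' ∉ a.tail)
    (hlen : k.length ≤ a.length) (hnp : ¬ k <+: a) :
    pvScanG [(k, v)] (a ++ X) = a ++ pvScanG [(k, v)] X := by
  obtain ⟨a', rfl⟩ : ∃ a', a = '<' :: a' := by
    cases a with
    | nil => simp at ha
    | cons x y => simp at ha; exact ⟨y, by rw [ha]⟩
  simp only [List.tail_cons] at hat
  have hnp2 : ¬ k <+: ('<' :: a') ++ X := pvNotPrefix_append k ('<' :: a') X hlen hnp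
  have hfind : [(k, v)].find? (fun p => p.1.isPrefixOf ('<' :: (a' ++ X))) = none := by
    rw [List.cons_append] at hnp2
    exact pvFind1_none _ _ _ hnp2
  rw [List.cons_append]
  rw [pvScanG_cons_none _ _ _ hfind,
      pvScanG_skip [(k, v)] (by simp [hk]) a' X hat]
  simp

-- one extra `replace` pass after the scan of T is the scan of T with (k, v) appended
theorem pvScanG_snoc (T : List (List Char × List Char)) (k v : List Char)
    (hTk : ∀ p ∈ T, p.1.head? = some '<' ∧ '<' ∉ p.1.tail)
    (hTv : ∀ p ∈ T, p.2.head? = some '<' ∧ '<' ∉ p.2.tail)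
    (hk : k.head? = some '<') (hkt : '<' ∉ k.tail)
    (hlen : ∀ p ∈ T, k.length ≤ p.2.length)
    (hnp : ∀ p ∈ T, ¬ k <+: p.2) :
    ∀ s, pvScanG [(k, v)] (pvScanG T s) = pvScanG (T ++ [(k, v)]) s := by
  have hkeys : ∀ p ∈ T, p.1 ≠ [] := fun p hp => pvNeNil p.1 (hTk p hp).1
  have hkne : k ≠ [] := pvNeNil k hk
  have key : ∀ (n : Nat) (s : List Char), s.length ≤ n →
      pvScanG [(k, v)] (pvScanG T s) = pvScanG (T ++ [(k, v)]) s := by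
    intro n
    induction n with
    | zero =>
      intro s hs
      rw [List.length_eq_zero_iff.mp (Nat.le_zero.mp hs)]
      rw [pvScanG_nil, pvScanG_nil, pvScanG_nil]
    | succ n ih =>
      intro s hs
      cases s with
      | nil => rw [pvScanG_nil, pvScanG_nil, pvScanG_nil]
      | cons c t =>
        cases hfind : T.find? (fun p => p.1.isPrefixOf (c :: t)) with
        | some p =>
          have hpm := List.mem_of_find?_eq_some hfind
          have hne1 : p.1 ≠ [] := hkeys p hpm
          have hfind2 : (T ++ [(k, v)]).find? (fun p => p.1.isPrefixOf (c :: t)) = some p := by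
            rw [List.find?_append, hfind]; rfl
          rw [pvScanG_cons_some T c t p hfind hne1,
              pvScanG_cons_some _ c t p hfind2 hne1,
              pvScanG_skip_val k v p.2 _ hk (hTv p hpm).1 (hTv p hpm).2
                (hlen p hpm) (hnp p hpm)]
          congr 1
          apply ih
          have h1 : 0 < p.1.length := List.length_pos_iff.mpr hne1
          simp at hs ⊢
          omega
        | none =>
          by_cases hkp : k <+: (c :: t)
          · obtain ⟨r, hr⟩ := hkp
            obtain ⟨mid, rfl⟩ : ∃ mid, k = '<' :: mid := by
              cases k with
              | nil => simp at hk
              | cons x y => simp at hk; exact ⟨y, by rw [hk]⟩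
            simp only [List.tail_cons] at hkt
            rw [List.cons_append] at hr
            injection hr with h1 h2
            subst h1; subst h2
            -- inner scan walks over the key chars
            rw [pvScanG_cons_none T _ _ hfind,
                pvScanG_skip T (fun p hp => (hTk p hp).1) mid r hkt]
            -- outer singleton scan fires on the key
            have hfind3 : [('<' :: mid, v)].find?
                (fun p => p.1.isPrefixOf ('<' :: (mid ++ pvScanG T r))) = some ('<' :: mid, v) :=
              pvFind1_some _ _ _ (List.cons_prefix_cons.mpr ⟨rfl, List.prefix_append mid _⟩)
            rw [pvScanG_cons_some _ _ _ _ hfind3 hkne]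
            have hdrop : ('<' :: (mid ++ pvScanG T r)).drop ('<' :: mid).length = pvScanG T r := by
              rw [← List.cons_append]; exact List.drop_left
            rw [hdrop]
            -- the appended table fires on the key too
            have hfind4 : (T ++ [('<' :: mid, v)]).find?
                (fun p => p.1.isPrefixOf ('<' :: (mid ++ r))) = some ('<' :: mid, v) := by
              rw [List.find?_append, hfind]
              exact pvFind1_some _ _ _ (List.cons_prefix_cons.mpr ⟨rfl, List.prefix_append mid _⟩)
            rw [pvScanG_cons_some _ _ _ _ hfind4 hkne]
            have hdrop2 : ('<' :: (mid ++ r)).drop ('<' :: mid).length = r := by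
              rw [← List.cons_append]; exact List.drop_left
            rw [hdrop2]
            congr 1
            apply ih
            simp at hs ⊢
            omega
          · have hfind2 : (T ++ [(k, v)]).find? (fun p => p.1.isPrefixOf (c :: t)) = none := by
              rw [List.find?_append, hfind]
              exact pvFind1_none _ _ _ hkp
            rw [pvScanG_cons_none T c t hfind, pvScanG_cons_none _ c t hfind2]
            have hnk : ¬ k <+: (c :: pvScanG T t) := by
              intro hpre
              obtain ⟨mid, rfl⟩ : ∃ mid, k = '<' :: mid := by
                cases k with
                | nil => simp at hk
                | cons x y => simp at hk; exact ⟨y, by rw [hk]⟩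
              simp only [List.tail_cons] at hkt
              rcases List.cons_prefix_cons.mp hpre with ⟨hc, hm⟩
              have := pvPrefix_of_prefix_scanG T hkeys (fun p hp => (hTv p hp).1) t mid hkt hm
              exact hkp (by rw [← hc]; exact List.cons_prefix_cons.mpr ⟨rfl, this⟩)
            have hfind3 : [(k, v)].find? (fun p => p.1.isPrefixOf (c :: pvScanG T t)) = none :=
              pvFind1_none _ _ _ hnk
            rw [pvScanG_cons_none _ _ _ hfind3]
            have hst : t.length ≤ n := by simp at hs; omega
            rw [ih t hst]
  intro s
  exact key s.length s le_rfl

theorem pvGo_eq_scanG (old new : List Char) (hne : old ≠ []) :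
    ∀ (fuel : Nat) (l acc : List Char), l.length ≤ fuel →
      PySem.Chars.replace.go old new fuel l acc = acc.reverse ++ pvScanG [(old, new)] l := by
  intro fuel
  induction fuel with
  | zero =>
    intro l acc hl
    rw [List.length_eq_zero_iff.mp (Nat.le_zero.mp hl)]
    rw [PySem.Chars.replace.go, pvScanG_nil]
  | succ n ih =>
    intro l acc hl
    cases l with
    | nil =>
      have h0 : PySem.Chars.replace.go old new (n + 1) [] acc = acc.reverse := by
        rw [PySem.Chars.replace.go]; omega
      rw [h0, pvScanG_nil]
      simp
    | cons c t =>
      rw [PySem.Chars.replace.go]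
      by_cases hp : old.isPrefixOf (c :: t)
      · rw [if_pos hp]
        have h1 : 0 < old.length := List.length_pos_iff.mpr hne
        have hd : ((c :: t).drop old.length).length ≤ n := by
          simp at hl ⊢; omega
        rw [ih _ _ hd,
            pvScanG_cons_some [(old, new)] c t (old, new)
              (pvFind1_some _ _ _ (List.isPrefixOf_iff_prefix.mp hp)) hne]
        simp
      · rw [if_neg hp, ih t (c :: acc) (by simp at hl ⊢; omega),
            pvScanG_cons_none [(old, new)] c t
              (pvFind1_none _ _ _ (fun hx => hp (List.isPrefixOf_iff_prefix.mpr hx)))]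
        simp

-- PySem's replace IS the single-key scan
theorem pvReplace_eq_scanG (old new : List Char) (hne : old ≠ []) (l : List Char) :
    PySem.Chars.replace l old new = pvScanG [(old, new)] l := by
  rw [PySem.Chars.replace]
  rw [if_neg (by simp [hne])]
  rw [pvGo_eq_scanG old new hne l.length l [] le_rfl]
  simp

def pvTableOK (T : List (List Char × List Char)) : Prop :=
  (∀ p ∈ T, (p.1.head? = some '<' ∧ '<' ∉ p.1.tail) ∧ (p.2.head? = some '<' ∧ '<' ∉ p.2.tail)) ∧
  (∀ p ∈ T, ∀ q ∈ T, p.1.length ≤ q.2.length ∧ ¬ p.1 <+: q.2)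

theorem pvFoldl_eq_scanG (T : List (List Char × List Char)) (hOK : pvTableOK T) (s : List Char) :
    T.foldl (fun l p => PySem.Chars.replace l p.1 p.2) s = pvScanG T s := by
  revert hOK
  induction T using List.reverseRecOn with
  | nil => intro _; rw [List.foldl_nil, pvScanG_nil_table]
  | append_singleton T q ih =>
    intro hOK
    have hOKT : pvTableOK T :=
      ⟨fun p hp => hOK.1 p (List.mem_append_left _ hp),
       fun p hp q' hq' => hOK.2 p (List.mem_append_left _ hp) q' (List.mem_append_left _ hq')⟩
    have hqm : q ∈ T ++ [q] := List.mem_append_right _ (List.mem_singleton.mpr rfl)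
    have hq1 := (hOK.1 q hqm).1
    have hTmem := fun p (hp : p ∈ T) => hOK.1 p (List.mem_append_left _ hp)
    rw [List.foldl_append, List.foldl_cons, List.foldl_nil, ih hOKT,
        pvReplace_eq_scanG q.1 q.2 (pvNeNil q.1 hq1.1)]
    have hsnoc := pvScanG_snoc T q.1 q.2
      (fun p hp => (hTmem p hp).1) (fun p hp => (hTmem p hp).2)
      hq1.1 hq1.2
      (fun p hp => (hOK.2 q hqm p (List.mem_append_left _ hp)).1)
      (fun p hp => (hOK.2 q hqm p (List.mem_append_left _ hp)).2) s
    rw [hsnoc]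

theorem pvScanB_nil : pvScanB [] = [] := by rw [pvScanB]

theorem pvScanB_cons_some (c : Char) (t : List Char) (p : List Char × List Char)
    (hc : c = '<') (h : pvStyles.find? (fun p => p.1.isPrefixOf (c :: t)) = some p) :
    pvScanB (c :: t) = p.2 ++ pvScanB ((c :: t).drop p.1.length) := by
  rw [pvScanB, if_pos hc]
  split
  · rename_i p' h'
    rw [h] at h'
    cases h'
    rfl
  · rename_i h'
    rw [h] at h'
    cases h'

theorem pvScanB_cons_none (c : Char) (t : List Char)
    (hc : c = '<') (h : pvStyles.find? (fun p => p.1.isPrefixOf (c :: t)) = none) :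
    pvScanB (c :: t) = c :: pvScanB t := by
  rw [pvScanB, if_pos hc]
  split
  · rename_i p' h'
    rw [h] at h'
    cases h'
  · rfl

theorem pvScanB_cons_ne (c : Char) (t : List Char) (hc : ¬ c = '<') :
    pvScanB (c :: t) = c :: pvScanB t := by
  rw [pvScanB, if_neg hc]

theorem pvStyles_keys_head : ∀ p ∈ pvStyles, p.1.head? = some '<' := by decide

theorem pvScanB_eq_scanG (l : List Char) : pvScanB l = pvScanG pvStyles l := by
  have key : ∀ (n : Nat) (l : List Char), l.length ≤ n → pvScanB l = pvScanG pvStyles l := by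
    intro n
    induction n with
    | zero =>
      intro l hl
      rw [List.length_eq_zero_iff.mp (Nat.le_zero.mp hl), pvScanB_nil, pvScanG_nil]
    | succ n ih =>
      intro l hl
      cases l with
      | nil => rw [pvScanB_nil, pvScanG_nil]
      | cons c t =>
        by_cases hc : c = '<'
        · cases hfind : pvStyles.find? (fun p => p.1.isPrefixOf (c :: t)) with
          | some p =>
            have hne := pvStyles_keys_ne_nil p (List.mem_of_find?_eq_some hfind)
            rw [pvScanB_cons_some c t p hc hfind, pvScanG_cons_some _ c t p hfind hne]
            congr 1
            apply ih
            have h1 : 0 < p.1.length := List.length_pos_iff.mpr hne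
            simp at hl ⊢
            omega
          | none =>
            rw [pvScanB_cons_none c t hc hfind, pvScanG_cons_none _ c t hfind,
                ih t (by simp at hl; omega)]
        · have hfind : pvStyles.find? (fun p => p.1.isPrefixOf (c :: t)) = none := by
            apply List.find?_eq_none.mpr
            intro p hp
            simp only [List.isPrefixOf_iff_prefix]
            exact pvNotPrefix_of_head _ _ (pvStyles_keys_head p hp) (by simp [hc])
          rw [pvScanB_cons_ne c t hc, pvScanG_cons_none _ c t hfind,
              ih t (by simp at hl; omega)]
  exact key l.length l le_rfl

set_option maxRecDepth 20000 in
theorem pvStyles_OK : pvTableOK pvStyles := by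
  constructor <;> decide

theorem pvFoldl_toList (L : List (String × String)) (s : String) :
    (L.foldl (fun r p => PySem.Str.replace r p.1 p.2) s).toList =
      (L.map (fun p => (p.1.toList, p.2.toList))).foldl
        (fun l p => PySem.Chars.replace l p.1 p.2) s.toList := by
  induction L generalizing s with
  | nil => rfl
  | cons q L' ih =>
    simp only [List.foldl_cons, List.map_cons]
    rw [ih, PySem.Str.toList_replace]

theorem pvStyles_eq_map : pvStyles = pvReplacements.map (fun p => (p.1.toList, p.2.toList)) := by
  rfl

-- ===== VERDICT (by name: the statement is the Claim_ definition above) =====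
theorem style_html_spec : Claim_equal_style_html := by
  intro raw _
  unfold Spec_style_html style_html style_html_alt
  have h1 := pvFoldl_toList pvReplacements raw
  rw [← pvStyles_eq_map, pvFoldl_eq_scanG pvStyles pvStyles_OK, ← pvScanB_eq_scanG] at h1
  rw [← h1, String.ofList_toList]
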